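-- pv_equiv track=rewrite | github.com/PeposoElOso/Ruleta-simulacion | funcs.py | frecuencia_absoluta_acumulada
-- ===== SOURCE A (Python) =====
-- def frecuencia_absoluta_acumulada(numeros, apuesta):
--     datos_flat = [num for sublist in numeros for num in sublist]
--     frecuencias = []
--
--     for i in range(1, len(datos_flat) + 1):
--         sublista = datos_flat[:i]
--         cuenta = sublista.count(apuesta)
--         frecuencias.append(cuenta)
--
--     return frecuencias
-- ===== SOURCE B (Python) =====
-- def frecuencia_absoluta_acumulada(numeros, apuesta):
--     frecuencias = []
--     cuenta = 0
--     for sublist in numeros: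
--         for num in sublist:
--             if num == apuesta:
--                 cuenta += 1
--             frecuencias.append(cuenta)
--     return frecuencias
-- ===== Notes on version B (the rewrite author's own statement) =====
-- stated objective: faster
-- what changed: replaces the per-prefix slice-and-count (re-scanning every prefix) with a single pass over the nested lists keeping one running counter
import Mathlib
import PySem

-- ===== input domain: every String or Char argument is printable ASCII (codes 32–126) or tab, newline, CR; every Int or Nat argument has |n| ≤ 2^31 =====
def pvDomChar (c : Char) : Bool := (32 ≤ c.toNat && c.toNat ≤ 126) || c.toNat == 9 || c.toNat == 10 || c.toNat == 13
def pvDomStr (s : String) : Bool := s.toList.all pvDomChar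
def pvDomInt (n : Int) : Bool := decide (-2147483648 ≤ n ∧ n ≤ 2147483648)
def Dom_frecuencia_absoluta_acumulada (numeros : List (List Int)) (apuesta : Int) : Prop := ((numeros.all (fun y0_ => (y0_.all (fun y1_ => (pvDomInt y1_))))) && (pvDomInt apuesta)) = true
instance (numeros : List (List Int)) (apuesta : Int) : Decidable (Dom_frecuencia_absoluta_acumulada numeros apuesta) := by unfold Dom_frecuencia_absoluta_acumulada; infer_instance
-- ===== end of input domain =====

-- B replaces A's per-prefix slice-and-count with a single pass keeping a running counter (faster, asymptotic).

-- ===== PORT A =====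
def frecuencia_absoluta_acumulada (numeros : List (List Int)) (apuesta : Int) : List Int :=
  let datos_flat := numeros.flatMap (fun sublist => sublist)
  (PySem.List.pyRange 1 ((datos_flat.length : Int) + 1) 1).foldl
    (fun frecuencias i =>
      let sublista := PySem.List.slice datos_flat none (some i)
      let cuenta : Int := (sublista.count apuesta : Int)
      frecuencias ++ [cuenta]) []

-- ===== PORT B =====
def frecuencia_absoluta_acumulada_alt (numeros : List (List Int)) (apuesta : Int) : List Int :=
  (numeros.foldl
    (fun st sublist =>
      sublist.foldl
        (fun st2 num =>
          let cuenta := if num == apuesta then st2.1 + 1 else st2.1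
          (cuenta, st2.2 ++ [cuenta])) st)
    ((0 : Int), ([] : List Int))).2

-- ===== PRECONDITION & SPEC =====
def Spec_frecuencia_absoluta_acumulada (numeros : List (List Int)) (apuesta : Int) (out : List Int) : Prop := out = frecuencia_absoluta_acumulada_alt numeros apuesta
instance (numeros : List (List Int)) (apuesta : Int) (out : List Int) : Decidable (Spec_frecuencia_absoluta_acumulada numeros apuesta out) := by unfold Spec_frecuencia_absoluta_acumulada; infer_instance

-- ===== CLAIM (what is proved, stated in full; the proofs are below) =====
def Claim_equal_frecuencia_absoluta_acumulada : Prop := ∀ (numeros : List (List Int)) (apuesta : Int), Dom_frecuencia_absoluta_acumulada numeros apuesta → Spec_frecuencia_absoluta_acumulada numeros apuesta (frecuencia_absoluta_acumulada numeros apuesta)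

-- ===== LEMMAS AND PROOFS =====

-- B's inner step, named for the proofs.
def pvStep (apuesta : Int) (st2 : Int × List Int) (num : Int) : Int × List Int :=
  let cuenta := if num == apuesta then st2.1 + 1 else st2.1
  (cuenta, st2.2 ++ [cuenta])

-- the nested foldl of B is the foldl of the flattened list
lemma pvFoldl_nested (apuesta : Int) (numeros : List (List Int)) (st : Int × List Int) :
    numeros.foldl (fun st sublist => sublist.foldl (pvStep apuesta) st) st
      = (numeros.flatMap (fun sublist => sublist)).foldl (pvStep apuesta) st := by
  induction numeros generalizing st with
  | nil => simp
  | cons y ys ih => simp [List.flatMap_cons, List.foldl_append, ih]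

-- the flat single-pass fold produces the prefix counts
lemma pvFoldl_flat (apuesta : Int) (xs : List Int) : ∀ (c : Int) (acc : List Int),
    xs.foldl (pvStep apuesta) (c, acc)
      = (c + (xs.count apuesta : Int),
         acc ++ (List.range xs.length).map
           (fun k => c + (((xs.take (k+1)).count apuesta : Nat) : Int))) := by
  induction xs with
  | nil => intro c acc; simp
  | cons x r ih =>
    intro c acc
    have hstep : pvStep apuesta (c, acc) x
        = (c + (if x = apuesta then 1 else 0), acc ++ [c + (if x = apuesta then 1 else 0)]) := by
      simp [pvStep]; split_ifs <;> simp
    rw [List.foldl_cons, hstep, ih, Prod.mk.injEq]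
    constructor
    · simp [List.count_cons]
      split_ifs <;> push_cast <;> omega
    · rw [List.length_cons, List.range_succ_eq_map, List.map_cons, List.map_map,
          List.append_assoc, List.singleton_append]
      congr 1
      rw [List.cons.injEq]
      constructor
      · simp; split_ifs <;> simp_all
      · apply List.map_congr_left
        intro k _
        simp only [Function.comp_apply, Nat.succ_eq_add_one, List.take_succ_cons,
          List.count_cons]
        split_ifs <;> simp_all <;> push_cast <;> omega

-- ===== VERDICT (by name: the statement is the Claim_ definition above) =====
theorem frecuencia_absoluta_acumulada_spec : Claim_equal_frecuencia_absoluta_acumulada := by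
  intro numeros apuesta _
  unfold Spec_frecuencia_absoluta_acumulada
  unfold frecuencia_absoluta_acumulada frecuencia_absoluta_acumulada_alt
  set datos := numeros.flatMap (fun sublist => sublist) with hdatos
  -- A side: foldl-append is a map over the range
  rw [PySem.List.foldl_append_singleton_eq_map, List.nil_append]
  -- B side: nested fold = flat fold = prefix counts
  have hB : (numeros.foldl
      (fun st sublist => sublist.foldl
        (fun st2 num =>
          let cuenta := if num == apuesta then st2.1 + 1 else st2.1
          (cuenta, st2.2 ++ [cuenta])) st) ((0:Int), ([]:List Int)))
      = (numeros.flatMap (fun sublist => sublist)).foldl (pvStep apuesta) (0, []) := by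
    rw [← pvFoldl_nested]
    rfl
  rw [hB, ← hdatos, pvFoldl_flat apuesta datos 0 []]
  simp only [zero_add, List.nil_append]
  -- both are now maps; identify the index lists and the functions
  have hr : (datos.length : Int) + 1 - 1 = (datos.length : Int) := by ring
  rw [PySem.List.pyRange_one, hr, Int.toNat_natCast, List.map_map]
  apply List.map_congr_left
  intro k hk
  simp only [Function.comp_apply]
  have h1 : (1 : Int) + (k : Int) = ((k + 1 : Nat) : Int) := by push_cast; ring
  rw [h1, PySem.List.slice_to_natCast]
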